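-- pv_equiv track=rewrite | github.com/NaserAldeenRezeq/SoilHeath | src/helpers/spliters.py | split_soil_elements
-- ===== SOURCE A (Python) =====
-- from typing import Any, Dict, Tuple
--
-- def split_soil_elements(query: str) -> Tuple[Dict[str, Any], Dict[str, Any]]:
--     """
--     Extracts soil and weather elements from a structured query string.
--
--     Args:
--         query (str): Formatted string containing [SoilData] and [WeatherData].
--
--     Returns:
--         Tuple[Dict[str, Any], Dict[str, Any]]: Two dictionaries for soil and weather data.
--     """
--     soil_data: Dict[str, str] = {}
--     weather_data: Dict[str, str] = {}
--     current_section = None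
--
--     lines = query.strip().splitlines()
--
--     for line in lines:
--         line = line.strip()
--         if not line:
--             continue
--
--         if line.startswith("[") and "]" in line:
--             section_end = line.find("]") + 1
--             section_name = line[1:section_end - 1]
--             current_section = section_name
--
--             inline_data = line[section_end:].strip()
--             if inline_data:
--                 entries = [e.strip() for e in inline_data.split(",") if e.strip()]
--                 for entry in entries:
--                     if ": " in entry:
--                         key, value = entry.split(": ", 1)
--                         if current_section == "SoilData":
--                             soil_data[key.strip()] = value.strip()
--                         elif current_section == "WeatherData":
--                             weather_data[key.strip()] = value.strip()
--         elif current_section: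
--             entries = [e.strip() for e in line.split(",") if e.strip()]
--             for entry in entries:
--                 if ": " in entry:
--                     key, value = entry.split(": ", 1)
--                     if current_section == "SoilData":
--                         soil_data[key.strip()] = value.strip()
--                     elif current_section == "WeatherData":
--                         weather_data[key.strip()] = value.strip()
--
--     return soil_data, weather_data
-- ===== SOURCE B (Python) =====
-- def split_soil_elements(query):
--     """
--     Extracts soil and weather elements from a structured query string.
--
--     Two-pass decomposition: first segment the input into ordered
--     (section name, accumulated text) records, then fill the two
--     dictionaries from the records in document order.
--     """
--     # pass 1: segment stripped non-empty lines into section records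
--     records = []
--     for raw in query.strip().splitlines():
--         line = raw.strip()
--         if not line:
--             continue
--         if line.startswith("[") and "]" in line:
--             close = line.index("]")
--             records.append([line[1:close], line[close + 1:].strip()])
--         elif records:
--             records[-1][1] += "," + line
--     # pass 2: fill the dictionaries from the records, in order (last wins)
--     soil, weather = {}, {}
--     for name, text in records:
--         if name == "SoilData":
--             target = soil
--         elif name == "WeatherData":
--             target = weather
--         else:
--             continue
--         for part in text.split(","):
--             entry = part.strip()
--             if entry and ": " in entry:
--                 key, value = entry.split(": ", 1)
--                 target[key.strip()] = value.strip()
--     return soil, weather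
-- ===== Notes on version B (the rewrite author's own statement) =====
-- stated objective: alternative
-- what changed: Replaces A's single interleaved pass (mutable current-section state writing into the dicts line by line) with a two-pass pipeline: pass 1 segments stripped lines into ordered (section, accumulated-text) records, pass 2 fills the two dictionaries from the records in document order.
import Mathlib
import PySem

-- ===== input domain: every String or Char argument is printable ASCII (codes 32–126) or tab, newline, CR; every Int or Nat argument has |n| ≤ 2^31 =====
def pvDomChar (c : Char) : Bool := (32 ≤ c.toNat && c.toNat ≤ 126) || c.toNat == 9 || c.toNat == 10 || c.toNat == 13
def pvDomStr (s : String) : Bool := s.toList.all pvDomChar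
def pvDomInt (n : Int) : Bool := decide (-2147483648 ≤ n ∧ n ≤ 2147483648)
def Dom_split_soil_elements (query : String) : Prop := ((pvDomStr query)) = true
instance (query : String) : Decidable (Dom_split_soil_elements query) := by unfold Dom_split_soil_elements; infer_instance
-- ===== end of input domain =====

-- B replaces A's single interleaved pass (mutable current-section state writing into the
-- dicts line by line) with a two-pass pipeline — segment into section records, then fill
-- the dicts from the records — same O(n) cost, alternative decomposition.

-- ===== PORT A =====
-- strings are handled as their char lists via PySem.Chars (exact on the ASCII domain)

-- entries = [e.strip() for e in text.split(",") if e.strip()]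
def pvA_entries (text : List Char) : List (List Char) :=
  ((PySem.Chars.splitOn text [',']).map PySem.Chars.strip).filter (fun e => !e.isEmpty)

-- the body of A's (twice-repeated) inner `for entry in entries:` loop
def pvA_putEntry (cur : String)
    (sw : PySem.Dict String String × PySem.Dict String String) (entry : List Char) :
    PySem.Dict String String × PySem.Dict String String :=
  if PySem.Chars.isIn [':', ' '] entry then
    match PySem.Chars.splitOnMax entry [':', ' '] 1 with
    | [key, value] =>
        if cur == "SoilData" then
          (sw.1.insert (String.ofList (PySem.Chars.strip key)) (String.ofList (PySem.Chars.strip value)), sw.2)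
        else if cur == "WeatherData" then
          (sw.1, sw.2.insert (String.ofList (PySem.Chars.strip key)) (String.ofList (PySem.Chars.strip value)))
        else sw
    | _ => sw  -- unreachable: with ": " in entry, split(": ", 1) yields exactly two parts
  else sw

def pvA_put (cur : String) (sw : PySem.Dict String String × PySem.Dict String String)
    (text : List Char) : PySem.Dict String String × PySem.Dict String String :=
  (pvA_entries text).foldl (pvA_putEntry cur) sw

-- A's `for line in lines:` loop; state = (soil_data, weather_data, current_section)
def pvA_loop : List (List Char) →
    PySem.Dict String String × PySem.Dict String String → Option String →
    PySem.Dict String String × PySem.Dict String String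
  | [], sw, _ => sw
  | raw :: rest, sw, cur =>
    let line := PySem.Chars.strip raw
    if line.isEmpty then pvA_loop rest sw cur
    else if PySem.Chars.startswith line ['['] && PySem.Chars.isIn [']'] line then
      let sectionEnd : Int := PySem.Chars.find line [']'] + 1
      let sectionName : String := String.ofList (PySem.Chars.slice line (some 1) (some (sectionEnd - 1)))
      let inlineData := PySem.Chars.strip (PySem.Chars.slice line (some sectionEnd) none)
      pvA_loop rest (if inlineData.isEmpty then sw else pvA_put sectionName sw inlineData)
        (some sectionName)
    else
      match cur with  -- `elif current_section:` — None and the empty section name are both falsy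
      | some c => if c == "" then pvA_loop rest sw cur else pvA_loop rest (pvA_put c sw line) cur
      | none => pvA_loop rest sw cur

def split_soil_elements (query : String) : (List (String × String)) × (List (String × String)) :=
  let sw := pvA_loop (PySem.Chars.splitlines (PySem.Chars.strip query.toList))
    (PySem.Dict.empty, PySem.Dict.empty) none
  (sw.1.items, sw.2.items)

-- ===== PORT B =====

-- body of pass 2's inner `for part in text.split(","):` loop
def pvB_fillEntry (d : PySem.Dict String String) (part : List Char) : PySem.Dict String String :=
  let entry := PySem.Chars.strip part
  if !entry.isEmpty && PySem.Chars.isIn [':', ' '] entry then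
    match PySem.Chars.splitOnMax entry [':', ' '] 1 with
    | [key, value] =>
        d.insert (String.ofList (PySem.Chars.strip key)) (String.ofList (PySem.Chars.strip value))
    | _ => d  -- unreachable: with ": " in entry, split(": ", 1) yields exactly two parts
  else d

def pvB_fill (d : PySem.Dict String String) (text : List Char) : PySem.Dict String String :=
  (PySem.Chars.splitOn text [',']).foldl pvB_fillEntry d

-- body of pass 2's `for name, text in records:` loop
def pvB_putRecord (sw : PySem.Dict String String × PySem.Dict String String)
    (rec : String × List Char) : PySem.Dict String String × PySem.Dict String String :=
  if rec.1 == "SoilData" then (pvB_fill sw.1 rec.2, sw.2)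
  else if rec.1 == "WeatherData" then (sw.1, pvB_fill sw.2 rec.2)
  else sw

-- pass 1: segment the lines into (section name, accumulated text) records
def pvB_pass1 : List (List Char) → List (String × List Char) → List (String × List Char)
  | [], records => records
  | raw :: rest, records =>
    let line := PySem.Chars.strip raw
    if line.isEmpty then pvB_pass1 rest records
    else if PySem.Chars.startswith line ['['] && PySem.Chars.isIn [']'] line then
      -- close = line.index("]"); "]" is present by the guard, so index = find
      let close : Int := PySem.Chars.find line [']']
      pvB_pass1 rest (records ++ [(String.ofList (PySem.Chars.slice line (some 1) (some close)),
        PySem.Chars.strip (PySem.Chars.slice line (some (close + 1)) none))])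
    else
      match records.getLast? with  -- records[-1][1] += "," + line (only if records is non-empty)
      | some last => pvB_pass1 rest (records.dropLast ++ [(last.1, last.2 ++ ',' :: line)])
      | none => pvB_pass1 rest records

def split_soil_elements_alt (query : String) : (List (String × String)) × (List (String × String)) :=
  let records := pvB_pass1 (PySem.Chars.splitlines (PySem.Chars.strip query.toList)) []
  let sw := records.foldl pvB_putRecord (PySem.Dict.empty, PySem.Dict.empty)
  (sw.1.items, sw.2.items)

-- ===== PRECONDITION & SPEC =====
def Spec_split_soil_elements (query : String) (out : (List (String × String)) × (List (String × String))) : Prop := out = split_soil_elements_alt query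
instance (query : String) (out : (List (String × String)) × (List (String × String))) : Decidable (Spec_split_soil_elements query out) := by unfold Spec_split_soil_elements; infer_instance

-- ===== CLAIM (what is proved, stated in full; the proofs are below) =====
def Claim_equal_split_soil_elements : Prop := ∀ (query : String), Dom_split_soil_elements query → Spec_split_soil_elements query (split_soil_elements query)

-- ===== LEMMAS AND PROOFS =====

-- simple recursion characterising single-character splitOn (proof-side only)
def pvSplitAux (c : Char) : List Char → List (List Char)
  | [] => [[]]
  | x :: xs =>
    if x = c then [] :: pvSplitAux c xs
    else (x :: (pvSplitAux c xs).headI) :: (pvSplitAux c xs).tail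

theorem pvSplitAux_ne_nil (c : Char) (s : List Char) : pvSplitAux c s ≠ [] := by
  cases s with
  | nil => simp [pvSplitAux]
  | cons x xs => unfold pvSplitAux; split <;> simp

theorem pv_go_spec (c : Char) (fuel : Nat) :
    ∀ (l cur : List Char) (acc : List (List Char)), l.length ≤ fuel →
    PySem.Chars.splitOn.go [c] fuel l cur acc =
      acc.reverse ++ (cur.reverse ++ (pvSplitAux c l).headI) :: (pvSplitAux c l).tail := by
  induction fuel with
  | zero =>
    intro l cur acc h
    have hl : l = [] := by cases l <;> simp_all
    subst hl
    simp [PySem.Chars.splitOn.go, pvSplitAux]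
  | succ f ih =>
    intro l cur acc h
    cases l with
    | nil => simp [PySem.Chars.splitOn.go, pvSplitAux]
    | cons x rest =>
      by_cases hx : x = c
      · subst hx
        obtain ⟨p, ps, hps⟩ := List.exists_cons_of_ne_nil (pvSplitAux_ne_nil x rest)
        rw [show PySem.Chars.splitOn.go [x] (f + 1) (x :: rest) cur acc =
              PySem.Chars.splitOn.go [x] f ((x :: rest).drop [x].length) [] (cur.reverse :: acc) by
            simp [PySem.Chars.splitOn.go, List.isPrefixOf]]
        simp only [List.length_cons, List.length_nil, Nat.zero_add, List.drop_one, List.tail_cons]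
        rw [ih rest [] (cur.reverse :: acc) (by simpa using h)]
        simp [pvSplitAux, hps]
      · obtain ⟨p, ps, hps⟩ := List.exists_cons_of_ne_nil (pvSplitAux_ne_nil c rest)
        rw [show PySem.Chars.splitOn.go [c] (f + 1) (x :: rest) cur acc =
              PySem.Chars.splitOn.go [c] f rest (x :: cur) acc by
            simp [PySem.Chars.splitOn.go, List.isPrefixOf, Ne.symm hx]]
        rw [ih rest (x :: cur) acc (by simpa using h)]
        simp [pvSplitAux, hx, hps]

theorem pv_splitOn_single (c : Char) (s : List Char) :
    PySem.Chars.splitOn s [c] = pvSplitAux c s := by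
  obtain ⟨p, ps, hps⟩ := List.exists_cons_of_ne_nil (pvSplitAux_ne_nil c s)
  unfold PySem.Chars.splitOn
  rw [pv_go_spec c (s.length + 1) s [] [] (by omega)]
  simp [hps]

theorem pv_splitAux_concat (c : Char) (t l : List Char) :
    pvSplitAux c (t ++ c :: l) = pvSplitAux c t ++ pvSplitAux c l := by
  induction t with
  | nil => simp [pvSplitAux]
  | cons x t ih =>
    by_cases hx : x = c
    · simp [pvSplitAux, hx, ih]
    · obtain ⟨p, ps, hps⟩ := List.exists_cons_of_ne_nil (pvSplitAux_ne_nil c t)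
      simp [pvSplitAux, hx, ih, hps]

theorem pv_splitOn_concat (c : Char) (t l : List Char) :
    PySem.Chars.splitOn (t ++ c :: l) [c] =
      PySem.Chars.splitOn t [c] ++ PySem.Chars.splitOn l [c] := by
  rw [pv_splitOn_single, pv_splitOn_single, pv_splitOn_single, pv_splitAux_concat]

theorem pv_entries_concat (t l : List Char) :
    pvA_entries (t ++ ',' :: l) = pvA_entries t ++ pvA_entries l := by
  unfold pvA_entries
  rw [pv_splitOn_concat, List.map_append, List.filter_append]

-- one key/value update on an already-stripped, non-empty entry
def pvKeyStep (d : PySem.Dict String String) (e : List Char) : PySem.Dict String String :=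
  if PySem.Chars.isIn [':', ' '] e then
    match PySem.Chars.splitOnMax e [':', ' '] 1 with
    | [key, value] =>
        d.insert (String.ofList (PySem.Chars.strip key)) (String.ofList (PySem.Chars.strip value))
    | _ => d
  else d

theorem pv_fill_eq (d : PySem.Dict String String) (text : List Char) :
    pvB_fill d text = (pvA_entries text).foldl pvKeyStep d := by
  unfold pvB_fill pvA_entries
  rw [List.foldl_filter, List.foldl_map]
  apply List.foldl_ext
  intro d' part hmem
  by_cases h1 : PySem.Chars.strip part = [] <;>
    by_cases h2 : PySem.Chars.isIn [':', ' '] (PySem.Chars.strip part) = true <;>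
      simp [pvB_fillEntry, pvKeyStep, h1, h2]

theorem pv_putEntry_soil (n : String) (h : (n == "SoilData") = true)
    (d w : PySem.Dict String String) (e : List Char) :
    pvA_putEntry n (d, w) e = (pvKeyStep d e, w) := by
  by_cases hin : PySem.Chars.isIn [':', ' '] e = true
  · cases hsp : PySem.Chars.splitOnMax e [':', ' '] 1 with
    | nil => simp [pvA_putEntry, pvKeyStep, hin, hsp]
    | cons k rest =>
      cases rest with
      | nil => simp [pvA_putEntry, pvKeyStep, hin, hsp]
      | cons v rest2 =>
        cases rest2 with
        | nil => simp [pvA_putEntry, pvKeyStep, hin, hsp, h]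
        | cons z zs => simp [pvA_putEntry, pvKeyStep, hin, hsp]
  · simp [pvA_putEntry, pvKeyStep, hin]

theorem pv_putEntry_weather (n : String) (h1 : (n == "SoilData") = false)
    (h2 : (n == "WeatherData") = true)
    (d w : PySem.Dict String String) (e : List Char) :
    pvA_putEntry n (d, w) e = (d, pvKeyStep w e) := by
  by_cases hin : PySem.Chars.isIn [':', ' '] e = true
  · cases hsp : PySem.Chars.splitOnMax e [':', ' '] 1 with
    | nil => simp [pvA_putEntry, pvKeyStep, hin, hsp]
    | cons k rest =>
      cases rest with
      | nil => simp [pvA_putEntry, pvKeyStep, hin, hsp]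
      | cons v rest2 =>
        cases rest2 with
        | nil => simp [pvA_putEntry, pvKeyStep, hin, hsp, h1, h2]
        | cons z zs => simp [pvA_putEntry, pvKeyStep, hin, hsp]
  · simp [pvA_putEntry, pvKeyStep, hin]

theorem pv_putEntry_other (n : String) (h1 : (n == "SoilData") = false)
    (h2 : (n == "WeatherData") = false)
    (sw : PySem.Dict String String × PySem.Dict String String) (e : List Char) :
    pvA_putEntry n sw e = sw := by
  by_cases hin : PySem.Chars.isIn [':', ' '] e = true
  · cases hsp : PySem.Chars.splitOnMax e [':', ' '] 1 with
    | nil => simp [pvA_putEntry, hin, hsp]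
    | cons k rest =>
      cases rest with
      | nil => simp [pvA_putEntry, hin, hsp]
      | cons v rest2 =>
        cases rest2 with
        | nil => simp [pvA_putEntry, hin, hsp, h1, h2]
        | cons z zs => simp [pvA_putEntry, hin, hsp]
  · simp [pvA_putEntry, hin]

theorem pv_put_soil_fold (n : String) (h : (n == "SoilData") = true) (es : List (List Char)) :
    ∀ (d w : PySem.Dict String String),
    es.foldl (pvA_putEntry n) (d, w) = (es.foldl pvKeyStep d, w) := by
  induction es with
  | nil => intro d w; rfl
  | cons e es ih =>
    intro d w
    rw [List.foldl_cons, List.foldl_cons, pv_putEntry_soil n h]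
    exact ih _ _

theorem pv_put_weather_fold (n : String) (h1 : (n == "SoilData") = false)
    (h2 : (n == "WeatherData") = true) (es : List (List Char)) :
    ∀ (d w : PySem.Dict String String),
    es.foldl (pvA_putEntry n) (d, w) = (d, es.foldl pvKeyStep w) := by
  induction es with
  | nil => intro d w; rfl
  | cons e es ih =>
    intro d w
    rw [List.foldl_cons, List.foldl_cons, pv_putEntry_weather n h1 h2]
    exact ih _ _

theorem pv_put_other_fold (n : String) (h1 : (n == "SoilData") = false)
    (h2 : (n == "WeatherData") = false) (es : List (List Char))
    (sw : PySem.Dict String String × PySem.Dict String String) :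
    es.foldl (pvA_putEntry n) sw = sw := by
  induction es generalizing sw with
  | nil => rfl
  | cons e es ih => rw [List.foldl_cons, pv_putEntry_other n h1 h2]; exact ih _

theorem pv_put_other (n : String) (h1 : (n == "SoilData") = false)
    (h2 : (n == "WeatherData") = false)
    (sw : PySem.Dict String String × PySem.Dict String String) (text : List Char) :
    pvA_put n sw text = sw := by
  unfold pvA_put
  exact pv_put_other_fold n h1 h2 _ _

theorem pv_putRecord_eq (sw : PySem.Dict String String × PySem.Dict String String)
    (n : String) (text : List Char) :
    pvB_putRecord sw (n, text) = pvA_put n sw text := by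
  obtain ⟨d, w⟩ := sw
  by_cases hS : (n == "SoilData") = true
  · simp only [pvB_putRecord, pvA_put, hS, if_true]
    rw [pv_fill_eq, pv_put_soil_fold n hS]
  · by_cases hW : (n == "WeatherData") = true
    · simp only [pvB_putRecord, pvA_put, hS, hW, Bool.false_eq_true, if_false, if_true]
      rw [pv_fill_eq, pv_put_weather_fold n (by simpa using hS) hW]
    · simp only [pvB_putRecord, pvA_put, hS, hW, Bool.false_eq_true, if_false]
      rw [pv_put_other_fold n (by simpa using hS) (by simpa using hW)]

theorem pv_put_nil (n : String) (sw : PySem.Dict String String × PySem.Dict String String) :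
    pvA_put n sw [] = sw := by
  have h : pvA_entries [] = [] := by decide
  simp [pvA_put, h]

theorem pv_put_concat (n : String) (sw : PySem.Dict String String × PySem.Dict String String)
    (t l : List Char) :
    pvA_put n sw (t ++ ',' :: l) = pvA_put n (pvA_put n sw t) l := by
  unfold pvA_put
  rw [pv_entries_concat, List.foldl_append]

theorem pv_main (ls : List (List Char)) :
    ∀ (recs : List (String × List Char))
      (sw : PySem.Dict String String × PySem.Dict String String),
    (pvB_pass1 ls recs).foldl pvB_putRecord sw =
      pvA_loop ls (recs.foldl pvB_putRecord sw) (recs.getLast?.map Prod.fst) := by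
  induction ls with
  | nil => intro recs sw; rfl
  | cons raw rest ih =>
    intro recs sw
    simp only [pvB_pass1, pvA_loop]
    by_cases hempty : (PySem.Chars.strip raw).isEmpty = true
    · simp only [hempty, if_true]
      exact ih recs sw
    · simp only [hempty, Bool.false_eq_true, if_false]
      by_cases hhdr : (PySem.Chars.startswith (PySem.Chars.strip raw) ['['] &&
          PySem.Chars.isIn [']'] (PySem.Chars.strip raw)) = true
      · simp only [hhdr, if_true, add_sub_cancel_right]
        rw [ih _ sw]
        simp only [List.getLast?_concat, Option.map_some, List.foldl_append, List.foldl_cons,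
          List.foldl_nil]
        rw [pv_putRecord_eq]
        split
        next hinl => rw [List.isEmpty_iff.mp hinl, pv_put_nil]
        next _ => rfl
      · simp only [hhdr, Bool.false_eq_true, if_false]
        cases hlast : recs.getLast? with
        | none =>
          have hnil : recs = [] := List.getLast?_eq_none_iff.mp hlast
          subst hnil
          simpa using ih [] sw
        | some last =>
          obtain ⟨n, t⟩ := last
          obtain ⟨r, rfl⟩ := List.getLast?_eq_some_iff.mp hlast
          rw [ih _ sw]
          simp only [List.dropLast_concat, List.getLast?_concat, Option.map_some,
            List.foldl_append, List.foldl_cons, List.foldl_nil]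
          rw [pv_putRecord_eq, pv_putRecord_eq, pv_put_concat]
          by_cases hz : (n == "") = true
          · have hn : n = "" := by simpa using hz
            subst hn
            simp only [pv_put_other "" (by decide) (by decide)]
            simp
          · simp [hz]

-- ===== VERDICT (by name: the statement is the Claim_ definition above) =====
theorem split_soil_elements_spec : Claim_equal_split_soil_elements := by
  intro q _
  unfold Spec_split_soil_elements split_soil_elements split_soil_elements_alt
  exact congrArg (fun sw => (sw.1.items, sw.2.items))
    (pv_main (PySem.Chars.splitlines (PySem.Chars.strip q.toList)) []
      (PySem.Dict.empty, PySem.Dict.empty)).symm
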